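-- pv_equiv track=rewrite | github.com/sudo-furqan/copeland-score | streamlit_app.py | calculate_copeland_score
-- ===== SOURCE A (Python) =====
-- import itertools
--
-- def calculate_copeland_score(total_scores):
--     alternatives = list(total_scores.keys())
--     copeland_scores = {alt: 0 for alt in alternatives}
--
--     for alt1, alt2 in itertools.combinations(alternatives, 2):
--         if total_scores[alt1] > total_scores[alt2]:
--             copeland_scores[alt1] += 1
--             copeland_scores[alt2] -= 1
--         elif total_scores[alt1] < total_scores[alt2]:
--             copeland_scores[alt2] += 1
--             copeland_scores[alt1] -= 1
--         # draw = no change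
--     return copeland_scores
-- ===== SOURCE B (Python) =====
-- def _bisect_left(a, x):
--     lo, hi = 0, len(a)
--     while lo < hi:
--         mid = (lo + hi) // 2
--         if a[mid] < x:
--             lo = mid + 1
--         else:
--             hi = mid
--     return lo
--
--
-- def _bisect_right(a, x):
--     lo, hi = 0, len(a)
--     while lo < hi:
--         mid = (lo + hi) // 2
--         if x < a[mid]:
--             hi = mid
--         else:
--             lo = mid + 1
--     return lo
--
--
-- def calculate_copeland_score(total_scores):
--     vals = sorted(total_scores.values())
--     n = len(vals)
--     scores = {}
--     for alt, v in total_scores.items():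
--         wins = _bisect_left(vals, v)          # entries with strictly smaller total
--         losses = n - _bisect_right(vals, v)   # entries with strictly larger total
--         scores[alt] = wins - losses
--     return scores
-- ===== Notes on version B (the rewrite author's own statement) =====
-- stated objective: faster
-- what changed: Instead of iterating over all O(n^2) pairs and incrementing/decrementing per comparison, B sorts the values once and computes each alternative's score directly as (count of strictly smaller values) - (count of strictly larger values) via binary search on the sorted value list.
import Mathlib
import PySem

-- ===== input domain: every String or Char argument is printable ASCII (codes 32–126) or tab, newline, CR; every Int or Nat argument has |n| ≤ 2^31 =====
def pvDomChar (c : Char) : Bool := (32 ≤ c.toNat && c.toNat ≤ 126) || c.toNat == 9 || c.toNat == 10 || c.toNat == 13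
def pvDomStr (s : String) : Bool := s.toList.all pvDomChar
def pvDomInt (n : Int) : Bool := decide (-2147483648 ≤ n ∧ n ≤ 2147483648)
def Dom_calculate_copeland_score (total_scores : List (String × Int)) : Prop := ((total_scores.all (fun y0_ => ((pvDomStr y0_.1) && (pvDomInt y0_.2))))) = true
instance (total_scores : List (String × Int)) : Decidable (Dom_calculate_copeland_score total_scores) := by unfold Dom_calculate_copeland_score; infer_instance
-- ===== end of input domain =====

-- B replaces A's O(n^2) pairwise-comparison loop by one sort of the values plus a binary-search
-- count of strictly smaller / strictly larger values per alternative (measured faster at size).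

-- ===== PORT A =====
-- the body of A's 'for alt1, alt2 in itertools.combinations(alternatives, 2)' loop
def pvStepA (T : PySem.Dict String Int) (d : PySem.Dict String Int) (c : List String) : PySem.Dict String Int :=
  match c with
  | [alt1, alt2] =>
    if T.getD alt1 0 > T.getD alt2 0 then
      (d.modify alt1 0 (· + 1)).modify alt2 0 (· - 1)
    else if T.getD alt1 0 < T.getD alt2 0 then
      (d.modify alt2 0 (· + 1)).modify alt1 0 (· - 1)
    else d
  | _ => d

def calculate_copeland_score (total_scores : List (String × Int)) : List (String × Int) :=
  let T := PySem.Dict.ofList total_scores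
  let alternatives := T.keys
  let copeland0 := alternatives.foldl (fun d a => d.insert a (0 : Int)) PySem.Dict.empty
  ((PySem.List.combinations alternatives 2).foldl (pvStepA T) copeland0).items

-- ===== PORT B =====
-- Source B's hand-written _bisect_left/_bisect_right are the standard bisect algorithm: PySem.List.bisectLeft/bisectRight
def calculate_copeland_score_alt (total_scores : List (String × Int)) : List (String × Int) :=
  let vals := PySem.List.sorted (total_scores.map (·.2)) (fun v => v) false
  let n : Int := vals.length
  (total_scores.foldl (fun (d : PySem.Dict String Int) p =>
      let wins : Int := PySem.List.bisectLeft vals p.2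
      let losses : Int := n - PySem.List.bisectRight vals p.2
      d.insert p.1 (wins - losses)) PySem.Dict.empty).items

-- ===== PRECONDITION & SPEC =====
-- Pre_ only requires distinct keys: the Python argument is a dict, which cannot hold duplicate keys,
-- so this excludes no input the Python function ever receives.
def Pre_calculate_copeland_score (total_scores : List (String × Int)) : Prop :=
  (total_scores.map Prod.fst).Nodup
instance (total_scores : List (String × Int)) : Decidable (Pre_calculate_copeland_score total_scores) := by unfold Pre_calculate_copeland_score; infer_instance

def pvWitness_calculate_copeland_score : (List (String × Int)) := [("a", 3), ("b", 1), ("c", 3)]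

def Spec_calculate_copeland_score (total_scores : List (String × Int)) (out : List (String × Int)) : Prop := out = calculate_copeland_score_alt total_scores
instance (total_scores : List (String × Int)) (out : List (String × Int)) : Decidable (Spec_calculate_copeland_score total_scores out) := by unfold Spec_calculate_copeland_score; infer_instance

-- ===== CLAIM (what is proved, stated in full; the proofs are below) =====
def Claim_equal_calculate_copeland_score : Prop := ∀ (total_scores : List (String × Int)), Dom_calculate_copeland_score total_scores → Pre_calculate_copeland_score total_scores → Spec_calculate_copeland_score total_scores (calculate_copeland_score total_scores)

-- ===== LEMMAS AND PROOFS =====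

-- the sign of a pairwise comparison, as A adds it to the two scores
def pvSgn (a b : Int) : Int := if a > b then 1 else if a < b then -1 else 0

-- bisect_left on a sorted list counts the strictly smaller elements
theorem pv_bisectLeft_count (s : List Int) (h : s.Pairwise (· ≤ ·)) (x : Int) :
    PySem.List.bisectLeft s x = s.countP (fun w => decide (w < x)) := by
  obtain ⟨hle, hlt, hge⟩ := PySem.List.bisectLeft_spec s x h
  set i := PySem.List.bisectLeft s x with hi
  rw [← List.take_append_drop i s, List.countP_append]
  have h1 : (s.take i).countP (fun w => decide (w < x)) = (s.take i).length := by
    rw [List.countP_eq_length]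
    intro a ha
    obtain ⟨j, hj, rfl⟩ := List.getElem_of_mem ha
    rw [List.getElem_take]
    simp only [decide_eq_true_eq]
    exact hlt j (by simp at hj; omega) (by simp at hj; omega)
  have h2 : (s.drop i).countP (fun w => decide (w < x)) = 0 := by
    rw [List.countP_eq_zero]
    intro a ha
    obtain ⟨j, hj, rfl⟩ := List.getElem_of_mem ha
    rw [List.getElem_drop]
    simp only [decide_eq_true_eq, not_lt]
    exact hge (i + j) (by simp at hj; omega) (by omega)
  rw [h1, h2, List.length_take]
  omega

-- bisect_right on a sorted list counts the elements ≤ x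
theorem pv_bisectRight_count (s : List Int) (h : s.Pairwise (· ≤ ·)) (x : Int) :
    PySem.List.bisectRight s x = s.countP (fun w => decide (w ≤ x)) := by
  obtain ⟨hle, hlt, hge⟩ := PySem.List.bisectRight_spec s x h
  set i := PySem.List.bisectRight s x with hi
  rw [← List.take_append_drop i s, List.countP_append]
  have h1 : (s.take i).countP (fun w => decide (w ≤ x)) = (s.take i).length := by
    rw [List.countP_eq_length]
    intro a ha
    obtain ⟨j, hj, rfl⟩ := List.getElem_of_mem ha
    rw [List.getElem_take]
    simp only [decide_eq_true_eq]
    exact hlt j (by simp at hj; omega) (by simp at hj; omega)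
  have h2 : (s.drop i).countP (fun w => decide (w ≤ x)) = 0 := by
    rw [List.countP_eq_zero]
    intro a ha
    obtain ⟨j, hj, rfl⟩ := List.getElem_of_mem ha
    rw [List.getElem_drop]
    simp only [decide_eq_true_eq, not_le]
    exact hge (i + j) (by simp at hj; omega) (by omega)
  rw [h1, h2, List.length_take]
  omega

-- counting the elements ≤ x and the elements > x partitions the list
theorem pv_cnt (l : List Int) (x : Int) :
    l.countP (fun w => decide (w ≤ x)) + l.countP (fun w => decide (x < w)) = l.length := by
  have h := List.length_eq_countP_add_countP (p := fun w => decide (w ≤ x)) (l := l)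
  have h2 : l.countP (fun a => decide ¬(decide (a ≤ x) = true)) = l.countP (fun w => decide (x < w)) :=
    List.countP_congr (by intro a _; simp)
  rw [h, h2]

-- the sum of comparison signs is (#smaller) − (#larger)
theorem pv_sum_sgn (vs : List Int) (x : Int) :
    (vs.map (fun v => pvSgn x v)).sum
      = (vs.countP (fun w => decide (w < x)) : Int) - (vs.countP (fun w => decide (x < w)) : Int) := by
  induction vs with
  | nil => simp
  | cons v t ih =>
      simp only [List.map_cons, List.sum_cons, List.countP_cons, ih, decide_eq_true_eq]
      show pvSgn x v + _ = _
      unfold pvSgn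
      push_cast
      split_ifs <;> omega

-- {alt: 0 for alt in alternatives} reads 0 at every key (0 is also the getD default)
theorem pv_getD_init (ks : List String) (d : PySem.Dict String Int)
    (h : ∀ x, d.getD x 0 = 0) (x : String) :
    (ks.foldl (fun d a => d.insert a (0 : Int)) d).getD x 0 = 0 := by
  induction ks generalizing d with
  | nil => simpa using h x
  | cons a t ih =>
      simp only [List.foldl_cons]
      exact ih _ (fun y => by rw [PySem.Dict.getD_insert]; split <;> simp [h])

-- effect of one pair update on a single entry
theorem pv_step_getD (T d : PySem.Dict String Int) (c y x : String) (hcy : c ≠ y) :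
    (pvStepA T d [c, y]).getD x 0
      = d.getD x 0 + (if x = c then pvSgn (T.getD c 0) (T.getD y 0)
                      else if x = y then pvSgn (T.getD y 0) (T.getD c 0) else 0) := by
  have hgd : ∀ (e : PySem.Dict String Int) k f x, (e.modify k (0:Int) f).getD x 0
      = if x = k then f (e.getD k 0) else e.getD x 0 := fun e k f x => PySem.Dict.getD_modify e k x 0 f
  show (if T.getD c 0 > T.getD y 0 then (d.modify c 0 (· + 1)).modify y 0 (· - 1)
      else if T.getD c 0 < T.getD y 0 then (d.modify y 0 (· + 1)).modify c 0 (· - 1) else d).getD x 0 = _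
  split_ifs <;> (try simp only [hgd]) <;> simp_all [pvSgn] <;> omega

-- inner fold of A's loop: all pairs (c, y) for y ∈ t
theorem pv_inner_getD (T : PySem.Dict String Int) (c : String) (t : List String)
    (hct : c ∉ t) (hnt : t.Nodup) (d : PySem.Dict String Int) (x : String) :
    ((t.map (fun y => [c, y])).foldl (pvStepA T) d).getD x 0
      = d.getD x 0 + (if x = c then (t.map (fun k => pvSgn (T.getD c 0) (T.getD k 0))).sum
                      else if x ∈ t then pvSgn (T.getD x 0) (T.getD c 0) else 0) := by
  induction t generalizing d with
  | nil => simp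
  | cons y t ih =>
      simp only [List.map_cons, List.foldl_cons, List.sum_cons]
      rcases List.nodup_cons.1 hnt with ⟨hyt, hnt'⟩
      rw [ih (fun h => hct (List.mem_cons_of_mem _ h)) hnt',
          pv_step_getD T d c y x (fun h => hct (h ▸ List.mem_cons_self))]
      have hyc : y ≠ c := fun h => hct (h ▸ List.mem_cons_self)
      by_cases hxc : x = c
      · subst hxc; simp; ring
      · by_cases hxy : x = y
        · subst hxy
          simp [hxc, hyt, List.mem_cons]
        · simp [hxc, hxy, List.mem_cons]

-- A's whole comparison loop, entry by entry
theorem pv_foldA_getD (T : PySem.Dict String Int) (ks : List String) (hnd : ks.Nodup)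
    (d : PySem.Dict String Int) (x : String) :
    ((PySem.List.combinations ks 2).foldl (pvStepA T) d).getD x 0
      = d.getD x 0 + (if x ∈ ks then (ks.map (fun k => pvSgn (T.getD x 0) (T.getD k 0))).sum else 0) := by
  induction ks generalizing d with
  | nil => simp [PySem.List.combinations_nil_succ]
  | cons c t ih =>
      rcases List.nodup_cons.1 hnd with ⟨hct, hnt⟩
      rw [show (2 : Nat) = 1 + 1 from rfl, PySem.List.combinations_cons_succ,
          PySem.List.combinations_one, List.foldl_append, List.map_map]
      rw [ih hnt]
      have hcomp : ((fun c_1 => c :: c_1) ∘ fun x : String => [x]) = (fun y : String => [c, y]) := rfl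
      rw [hcomp, pv_inner_getD T c t hct hnt d x]
      simp only [List.map_cons, List.sum_cons, List.mem_cons]
      by_cases hxc : x = c
      · subst hxc
        have hxt : x ∉ t := hct
        simp [hxt, pvSgn]
      · by_cases hxt : x ∈ t
        · simp only [if_neg hxc, if_pos hxt, if_pos (Or.inr hxt)]
          ring
        · simp [hxc, hxt]

-- one pair update never changes the key list when both keys are present
theorem pv_step_keys (T d : PySem.Dict String Int) (c : List String)
    (hc : ∀ a ∈ c, a ∈ d.keys) : (pvStepA T d c).keys = d.keys := by
  have hk : ∀ (e : PySem.Dict String Int) k f, k ∈ e.keys → (e.modify k (0:Int) f).keys = e.keys := by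
    intro e k f hm
    rw [PySem.Dict.keys_modify, PySem.Dict.keys_insert_of_contains]
    exact (PySem.Dict.contains_iff_mem_keys _ _).2 hm
  match c with
  | [a1, a2] =>
    have h1 : a1 ∈ d.keys := hc a1 (by simp)
    have h2 : a2 ∈ d.keys := hc a2 (by simp)
    show (if T.getD a1 0 > T.getD a2 0 then (d.modify a1 0 (· + 1)).modify a2 0 (· - 1)
        else if T.getD a1 0 < T.getD a2 0 then (d.modify a2 0 (· + 1)).modify a1 0 (· - 1) else d).keys = d.keys
    split_ifs <;> simp [hk, h1, h2]
  | [] => rfl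
  | [_] => rfl
  | _ :: _ :: _ :: _ => rfl

-- A's whole loop never changes the key list
theorem pv_foldA_keys (T : PySem.Dict String Int) (cs : List (List String))
    (d : PySem.Dict String Int) (hc : ∀ c ∈ cs, ∀ a ∈ c, a ∈ d.keys) :
    (cs.foldl (pvStepA T) d).keys = d.keys := by
  induction cs generalizing d with
  | nil => rfl
  | cons c cs ih =>
      have hstep := pv_step_keys T d c (hc c (List.mem_cons_self))
      simp only [List.foldl_cons]
      rw [ih _ (fun c' hc' a ha => by rw [hstep]; exact hc c' (List.mem_cons_of_mem _ hc') a ha), hstep]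

-- ofList of a duplicate-free association list keeps the items unchanged
theorem pv_items_ofList (ts : List (String × Int)) (h : (ts.map Prod.fst).Nodup) :
    (PySem.Dict.ofList ts).items = ts := by
  unfold PySem.Dict.ofList PySem.Dict.update
  have := PySem.Dict.items_foldl_insert_fresh ts Prod.fst Prod.snd (PySem.Dict.empty) (by simp) h
  simpa using this

-- ===== VERDICT (by name: the statement is the Claim_ definition above) =====
theorem calculate_copeland_score_spec : Claim_equal_calculate_copeland_score := by
  intro ts _hdom hpre
  unfold Spec_calculate_copeland_score
  unfold Pre_calculate_copeland_score at hpre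
  show calculate_copeland_score ts = calculate_copeland_score_alt ts
  simp only [calculate_copeland_score, calculate_copeland_score_alt]
  set T := PySem.Dict.ofList ts with hT
  have hitems : T.items = ts := pv_items_ofList ts hpre
  have hkeys : T.keys = ts.map Prod.fst := by
    simp only [PySem.Dict.keys, hitems]
  have hknd : T.keys.Nodup := by rw [hkeys]; exact hpre
  have hget : ∀ p ∈ ts, T.getD p.1 0 = p.2 := by
    intro p hp
    exact PySem.Dict.getD_of_mem_items T (by rw [hitems]; exact (by simpa using hp)) hknd 0
  set vs := ts.map (fun p : String × Int => p.2) with hvs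
  -- the sorted value list
  set vals := PySem.List.sorted vs (fun v => v) false with hvals
  have hperm : vals.Perm vs := PySem.List.sorted_perm vs (fun v => v) false
  have hsortedle : vals.Pairwise (· ≤ ·) := by
    have := PySem.List.sorted_pairwise vs (fun v : Int => v)
    simpa using this
  -- the initial zero dict of A
  set d0 := T.keys.foldl (fun d a => d.insert a (0 : Int)) PySem.Dict.empty with hd0
  have hd0keys : d0.keys = T.keys := by
    rw [hd0, PySem.Dict.keys_foldl_insert T.keys (fun _ _ => (0 : Int)) PySem.Dict.empty]
    rw [PySem.Dict.keys_empty, PySem.Set.update_nil_left, PySem.Set.ofList_eq_self_of_nodup _ hknd]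
  have hd0get : ∀ x, d0.getD x 0 = 0 :=
    fun x => pv_getD_init T.keys PySem.Dict.empty (by simp) x
  -- A's final dict
  set dF := (PySem.List.combinations T.keys 2).foldl (pvStepA T) d0 with hdF
  have hFkeys : dF.keys = T.keys := by
    rw [hdF, pv_foldA_keys T _ d0
      (fun c hc a ha => by
        rw [hd0keys]
        exact ((PySem.List.mem_combinations_iff _ _ _).1 hc).1.subset ha), hd0keys]
  have hFget : ∀ x, dF.getD x 0
      = (if x ∈ T.keys then (T.keys.map (fun k => pvSgn (T.getD x 0) (T.getD k 0))).sum else 0) := by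
    intro x
    rw [hdF, pv_foldA_getD T T.keys hknd d0 x, hd0get]
    ring
  -- A's items
  rw [PySem.Dict.items_eq_map_keys dF (hFkeys ▸ hknd) 0, hFkeys, hkeys]
  -- B's items
  rw [PySem.Dict.items_foldl_insert_fresh ts (fun p => p.1)
        (fun p => ((PySem.List.bisectLeft vals p.2 : Int)
          - ((vals.length : Int) - (PySem.List.bisectRight vals p.2 : Int))))
        PySem.Dict.empty (by simp) (by simpa using hpre)]
  simp only [List.map_map]
  rw [show (PySem.Dict.empty : PySem.Dict String Int).items = [] from rfl, List.nil_append]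
  apply List.map_congr_left
  intro p hp
  simp only [Function.comp]
  congr 1
  -- left: A's score at p.1;  right: B's score at p.1
  rw [hFget p.1, if_pos (by rw [hkeys]; exact List.mem_map_of_mem hp)]
  rw [hkeys, List.map_map]
  have hmapeq : (ts.map ((fun k => pvSgn (T.getD p.1 0) (T.getD k 0)) ∘ Prod.fst))
      = ts.map (fun q => pvSgn p.2 q.2) := by
    apply List.map_congr_left
    intro q hq
    simp only [Function.comp]
    rw [hget q hq, hget p hp]
  rw [hmapeq]
  have hsum : (ts.map (fun q : String × Int => pvSgn p.2 q.2)).sum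
      = (vs.map (fun v => pvSgn p.2 v)).sum := by
    rw [hvs, List.map_map]; rfl
  rw [hsum, pv_sum_sgn vs p.2]
  -- now the counting identities
  rw [pv_bisectLeft_count vals hsortedle p.2, pv_bisectRight_count vals hsortedle p.2]
  rw [hperm.countP_eq, hperm.countP_eq]
  have hlen : vals.length = vs.length := hperm.length_eq
  have hpart := pv_cnt vs p.2
  have hle1 : vs.countP (fun w => decide (w < p.2)) ≤ vs.length := List.countP_le_length
  have hle2 : vs.countP (fun w => decide (w ≤ p.2)) ≤ vs.length := List.countP_le_length
  rw [hlen]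
  omega
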